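-- pv_equiv track=rewrite | github.com/JakeSaunders1995/comp16321MarkingMid | CW_rugby/rugby_q44958jp.py | summate
-- ===== SOURCE A (Python) =====
-- def summate(string): #adds up the score of the team based on scoring types and quantity
-- 	score = 0
-- 	for i in range(len(string)):
-- 		if string[i] == "t": # try
-- 			score+=5
-- 		elif string[i] == "c": # goal kick
-- 			score+=2
-- 		elif string[i] in ("pd"): #penalty or drop goal
-- 			score+=3
-- 	return score
-- ===== SOURCE B (Python) =====
-- def summate(string):
--     # staged passes: count each scoring letter with str.count, then combine
--     return (5 * string.count("t")
--             + 2 * string.count("c")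
--             + 3 * string.count("p")
--             + 3 * string.count("d"))
-- ===== Notes on version B (the rewrite author's own statement) =====
-- stated objective: faster
-- what changed: Replaced the indexed single-pass scan-and-branch loop with four staged str.count passes (one per scoring letter) combined by fixed arithmetic 5*t + 2*c + 3*p + 3*d; str.count runs at C speed with no per-character Python bytecode.
import Mathlib
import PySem

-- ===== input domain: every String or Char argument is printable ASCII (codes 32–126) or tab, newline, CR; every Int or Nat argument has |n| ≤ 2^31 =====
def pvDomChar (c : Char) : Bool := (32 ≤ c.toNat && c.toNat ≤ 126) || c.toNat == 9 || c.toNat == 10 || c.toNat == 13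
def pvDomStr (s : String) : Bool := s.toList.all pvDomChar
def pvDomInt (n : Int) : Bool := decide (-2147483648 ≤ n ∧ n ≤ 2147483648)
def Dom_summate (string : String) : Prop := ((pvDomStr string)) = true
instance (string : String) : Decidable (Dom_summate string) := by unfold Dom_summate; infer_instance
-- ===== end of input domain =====

-- B replaces the single scan-and-branch loop by four staged str.count passes combined with fixed arithmetic (measured faster by a constant factor; same O(n)).
-- ===== PORT A =====
def summate (string : String) : Int :=
  (PySem.List.pyRange 0 (PySem.Str.len string) 1).foldl
    (fun score i =>
      (fun (score : Int) (ch : Char) =>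
        if ch = 't' then score + 5
        else if ch = 'c' then score + 2
        else if PySem.Chars.isIn [ch] ['p', 'd'] then score + 3
        else score) score (PySem.List.pyGetD string.toList i ' ')) 0

-- ===== PORT B =====
def summate_alt (string : String) : Int :=
  5 * (PySem.Str.count string "t" : Int)
    + 2 * (PySem.Str.count string "c" : Int)
    + 3 * (PySem.Str.count string "p" : Int)
    + 3 * (PySem.Str.count string "d" : Int)

-- ===== PRECONDITION & SPEC =====
def Spec_summate (string : String) (out : Int) : Prop := out = summate_alt string
instance (string : String) (out : Int) : Decidable (Spec_summate string out) := by unfold Spec_summate; infer_instance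

-- ===== CLAIM (what is proved, stated in full; the proofs are below) =====
def Claim_equal_summate : Prop := ∀ (string : String), Dom_summate string → Spec_summate string (summate string)

-- ===== LEMMAS AND PROOFS =====

-- a one-character needle is a substring of "pd" exactly when it is one of its characters
theorem isIn_singleton_pd (ch : Char) :
    PySem.Chars.isIn [ch] ['p', 'd'] = (ch = 'p' ∨ ch = 'd' : Bool) := by
  rw [Bool.eq_iff_iff, PySem.Chars.isIn_iff_infix]
  constructor
  · intro h; have := h.sublist.subset; simp at this; simp [this]
  · intro h; simp at h; rcases h with h | h <;> subst h
    · exact ⟨[], ['d'], rfl⟩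
    · exact ⟨['p'], [], rfl⟩

-- A's per-character loop accumulates exactly the weighted character counts
theorem loopA_eq (l : List Char) (a : Int) :
    l.foldl (fun (score : Int) (ch : Char) =>
        if ch = 't' then score + 5
        else if ch = 'c' then score + 2
        else if PySem.Chars.isIn [ch] ['p', 'd'] then score + 3
        else score) a
      = a + 5 * (l.count 't' : Int) + 2 * (l.count 'c' : Int)
          + 3 * (l.count 'p' : Int) + 3 * (l.count 'd' : Int) := by
  induction l generalizing a with
  | nil => simp
  | cons x xs ih =>
    rw [List.foldl_cons, ih, isIn_singleton_pd]
    split_ifs with h1 h2 h3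
    · subst h1; simp [List.count_cons]; ring
    · subst h2; simp [List.count_cons, h1]; ring
    · simp only [decide_eq_true_eq] at h3
      rcases h3 with h3 | h3 <;> subst h3 <;> simp [List.count_cons] <;> ring
    · simp only [decide_eq_true_eq, not_or] at h3
      simp [h1, h2, h3.1, h3.2]

-- Python's s.count(sub) for a ONE-character sub counts that character's occurrences
theorem go_single (c : Char) : ∀ (fuel : Nat) (l : List Char) (acc : Nat), l.length ≤ fuel →
    PySem.Chars.count.go [c] fuel l acc = acc + l.count c := by
  intro fuel
  induction fuel with
  | zero => intro l acc h
            have : l = [] := List.eq_nil_of_length_eq_zero (Nat.le_zero.mp h)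
            subst this; simp [PySem.Chars.count.go]
  | succ n ih =>
    intro l acc h
    cases l with
    | nil => simp [PySem.Chars.count.go]
    | cons x t =>
      have ht : t.length ≤ n := by simpa using Nat.le_of_succ_le_succ h
      by_cases hx : c = x
      · subst hx
        rw [show PySem.Chars.count.go [c] (n+1) (c :: t) acc
              = PySem.Chars.count.go [c] n t (acc + 1) from by
            simp [PySem.Chars.count.go, List.isPrefixOf]]
        rw [ih t (acc+1) ht, List.count_cons]
        simp; omega
      · rw [show PySem.Chars.count.go [c] (n+1) (x :: t) acc
              = PySem.Chars.count.go [c] n t acc from by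
            simp [PySem.Chars.count.go, List.isPrefixOf, hx]]
        rw [ih t acc ht, List.count_cons]
        simp [Ne.symm hx]

theorem count_single (l : List Char) (c : Char) : PySem.Chars.count l [c] = l.count c := by
  simp [PySem.Chars.count, go_single c l.length l 0 le_rfl]

theorem summate_eq_alt (string : String) : summate string = summate_alt string := by
  unfold summate summate_alt
  rw [show PySem.Str.len string = (string.toList.length : Int) from by
        simp [PySem.Str.len_eq]]
  rw [PySem.List.foldl_pyRange_zero_pyGetD' string.toList ' '
        (fun (score : Int) (ch : Char) =>
          if ch = 't' then score + 5
          else if ch = 'c' then score + 2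
          else if PySem.Chars.isIn [ch] ['p', 'd'] then score + 3
          else score) 0]
  rw [loopA_eq]
  simp only [PySem.Str.count_eq]
  rw [show ("t" : String).toList = ['t'] from rfl, show ("c" : String).toList = ['c'] from rfl,
      show ("p" : String).toList = ['p'] from rfl, show ("d" : String).toList = ['d'] from rfl]
  rw [count_single, count_single, count_single, count_single]
  ring

-- ===== VERDICT (by name: the statement is the Claim_ definition above) =====
theorem summate_spec : Claim_equal_summate := by
  intro string _
  unfold Spec_summate
  exact summate_eq_alt string
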